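-- pv_equiv track=rewrite | github.com/assenv/bingo-caller | bingo-caller_v1.0.py | group_bingo_numbers
-- ===== SOURCE A (Python) =====
-- def group_bingo_numbers(drawn):
--     groups = {'B': [], 'I': [], 'N': [], 'G': [], 'O': []}
--     for n in drawn:
--         if 1 <= n <= 15:
--             groups['B'].append(n)
--         elif 16 <= n <= 30:
--             groups['I'].append(n)
--         elif 31 <= n <= 45:
--             groups['N'].append(n)
--         elif 46 <= n <= 60:
--             groups['G'].append(n)
--         elif 61 <= n <= 75:
--             groups['O'].append(n)
--     for letter in groups:
--         groups[letter].sort()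
--     return groups
-- ===== SOURCE B (Python) =====
-- def group_bingo_numbers(drawn):
--     # Counting sort over the fixed 1..75 range: one pass to count, then emit each
--     # bucket already in order -- no comparison sort.
--     counts = [0] * 76
--     for n in drawn:
--         if 1 <= n <= 75:
--             counts[n] += 1
--     def bucket(lo, hi):
--         out = []
--         for v in range(lo, hi + 1):
--             out.extend([v] * counts[v])
--         return out
--     return {'B': bucket(1, 15), 'I': bucket(16, 30), 'N': bucket(31, 45),
--             'G': bucket(46, 60), 'O': bucket(61, 75)}
-- ===== Notes on version B (the rewrite author's own statement) =====
-- stated objective: faster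
-- what changed: Replaces dict-of-lists plus a comparison sort per bucket with a counting sort over the fixed 1..75 range: one counting pass, then each bucket is emitted in increasing order from the counters.
import Mathlib
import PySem

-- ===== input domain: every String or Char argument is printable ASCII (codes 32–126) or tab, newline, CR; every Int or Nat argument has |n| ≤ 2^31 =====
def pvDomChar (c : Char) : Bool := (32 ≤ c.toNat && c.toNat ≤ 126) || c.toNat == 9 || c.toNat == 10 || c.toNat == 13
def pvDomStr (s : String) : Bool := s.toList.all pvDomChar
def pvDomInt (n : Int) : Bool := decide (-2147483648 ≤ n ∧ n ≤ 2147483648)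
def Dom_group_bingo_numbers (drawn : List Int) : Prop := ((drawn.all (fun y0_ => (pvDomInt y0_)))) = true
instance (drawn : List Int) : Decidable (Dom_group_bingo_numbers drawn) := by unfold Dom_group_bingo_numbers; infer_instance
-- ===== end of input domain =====

-- B replaces per-bucket comparison sorts with a counting sort over the fixed 1..75 range (objective: faster).

-- ===== PORT A =====
-- A appends each drawn number to one of five dict buckets, then sorts each bucket.
def group_bingo_numbers (drawn : List Int) : List (String × List Int) :=
  let g := drawn.foldl
    (fun (acc : List Int × List Int × List Int × List Int × List Int) n =>
      let (b, i, nn, gg, o) := acc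
      if 1 ≤ n ∧ n ≤ 15 then (b ++ [n], i, nn, gg, o)
      else if 16 ≤ n ∧ n ≤ 30 then (b, i ++ [n], nn, gg, o)
      else if 31 ≤ n ∧ n ≤ 45 then (b, i, nn ++ [n], gg, o)
      else if 46 ≤ n ∧ n ≤ 60 then (b, i, nn, gg ++ [n], o)
      else if 61 ≤ n ∧ n ≤ 75 then (b, i, nn, gg, o ++ [n])
      else (b, i, nn, gg, o))
    ([], [], [], [], [])
  [("B", PySem.List.sorted g.1 (fun x => x) false),
   ("I", PySem.List.sorted g.2.1 (fun x => x) false),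
   ("N", PySem.List.sorted g.2.2.1 (fun x => x) false),
   ("G", PySem.List.sorted g.2.2.2.1 (fun x => x) false),
   ("O", PySem.List.sorted g.2.2.2.2 (fun x => x) false)]

-- ===== PORT B =====
-- counter array counts[1..75], ported as a pointwise-updated function
def bingoCounts (drawn : List Int) : Int → Nat :=
  drawn.foldl
    (fun c n => if 1 ≤ n ∧ n ≤ 75 then (fun v => if v = n then c v + 1 else c v) else c)
    (fun _ => 0)

-- 'for v in range(lo, hi+1): out.extend([v] * counts[v])'
def bingoBucket (counts : Int → Nat) (lo hi : Int) : List Int :=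
  (PySem.List.pyRange lo (hi + 1) 1).foldl
    (fun acc v => acc ++ List.replicate (counts v) v) []

def group_bingo_numbers_alt (drawn : List Int) : List (String × List Int) :=
  let counts := bingoCounts drawn
  [("B", bingoBucket counts 1 15),
   ("I", bingoBucket counts 16 30),
   ("N", bingoBucket counts 31 45),
   ("G", bingoBucket counts 46 60),
   ("O", bingoBucket counts 61 75)]

-- ===== PRECONDITION & SPEC =====
def Spec_group_bingo_numbers (drawn : List Int) (out : List (String × List Int)) : Prop := out = group_bingo_numbers_alt drawn
instance (drawn : List Int) (out : List (String × List Int)) : Decidable (Spec_group_bingo_numbers drawn out) := by unfold Spec_group_bingo_numbers; infer_instance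

-- ===== CLAIM (what is proved, stated in full; the proofs are below) =====
def Claim_equal_group_bingo_numbers : Prop := ∀ (drawn : List Int), Dom_group_bingo_numbers drawn → Spec_group_bingo_numbers drawn (group_bingo_numbers drawn)

-- ===== LEMMAS AND PROOFS =====

-- A's fold computes the five range-filters of drawn, appended to the accumulator.
set_option maxHeartbeats 1000000 in
theorem bingo_fold_eq_filters (drawn : List Int)
    (acc : List Int × List Int × List Int × List Int × List Int) :
    drawn.foldl
      (fun (acc : List Int × List Int × List Int × List Int × List Int) n =>
        let (b, i, nn, gg, o) := acc
        if 1 ≤ n ∧ n ≤ 15 then (b ++ [n], i, nn, gg, o)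
        else if 16 ≤ n ∧ n ≤ 30 then (b, i ++ [n], nn, gg, o)
        else if 31 ≤ n ∧ n ≤ 45 then (b, i, nn ++ [n], gg, o)
        else if 46 ≤ n ∧ n ≤ 60 then (b, i, nn, gg ++ [n], o)
        else if 61 ≤ n ∧ n ≤ 75 then (b, i, nn, gg, o ++ [n])
        else (b, i, nn, gg, o)) acc
    = (acc.1 ++ drawn.filter (fun n => decide (1 ≤ n ∧ n ≤ 15)),
       acc.2.1 ++ drawn.filter (fun n => decide (16 ≤ n ∧ n ≤ 30)),
       acc.2.2.1 ++ drawn.filter (fun n => decide (31 ≤ n ∧ n ≤ 45)),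
       acc.2.2.2.1 ++ drawn.filter (fun n => decide (46 ≤ n ∧ n ≤ 60)),
       acc.2.2.2.2 ++ drawn.filter (fun n => decide (61 ≤ n ∧ n ≤ 75))) := by
  induction drawn generalizing acc with
  | nil => simp
  | cons n rest ih =>
    obtain ⟨b, i, nn, gg, o⟩ := acc
    simp only [List.foldl_cons]
    split_ifs with h1 h2 h3 h4 h5
    · have d1 : decide (1 ≤ n ∧ n ≤ 15) = true := by simpa using h1
      have d2 : decide (16 ≤ n ∧ n ≤ 30) = false := by simp; omega
      have d3 : decide (31 ≤ n ∧ n ≤ 45) = false := by simp; omega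
      have d4 : decide (46 ≤ n ∧ n ≤ 60) = false := by simp; omega
      have d5 : decide (61 ≤ n ∧ n ≤ 75) = false := by simp; omega
      rw [ih]
      simp only [List.filter_cons, d1, d2, d3, d4, d5, if_true, if_false, Bool.false_eq_true,
        List.append_assoc, List.singleton_append]
    · have d1 : decide (1 ≤ n ∧ n ≤ 15) = false := by simp; omega
      have d2 : decide (16 ≤ n ∧ n ≤ 30) = true := by simpa using h2
      have d3 : decide (31 ≤ n ∧ n ≤ 45) = false := by simp; omega
      have d4 : decide (46 ≤ n ∧ n ≤ 60) = false := by simp; omega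
      have d5 : decide (61 ≤ n ∧ n ≤ 75) = false := by simp; omega
      rw [ih]
      simp only [List.filter_cons, d1, d2, d3, d4, d5, if_true, if_false, Bool.false_eq_true,
        List.append_assoc, List.singleton_append]
    · have d1 : decide (1 ≤ n ∧ n ≤ 15) = false := by simp; omega
      have d2 : decide (16 ≤ n ∧ n ≤ 30) = false := by simp; omega
      have d3 : decide (31 ≤ n ∧ n ≤ 45) = true := by simpa using h3
      have d4 : decide (46 ≤ n ∧ n ≤ 60) = false := by simp; omega
      have d5 : decide (61 ≤ n ∧ n ≤ 75) = false := by simp; omega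
      rw [ih]
      simp only [List.filter_cons, d1, d2, d3, d4, d5, if_true, if_false, Bool.false_eq_true,
        List.append_assoc, List.singleton_append]
    · have d1 : decide (1 ≤ n ∧ n ≤ 15) = false := by simp; omega
      have d2 : decide (16 ≤ n ∧ n ≤ 30) = false := by simp; omega
      have d3 : decide (31 ≤ n ∧ n ≤ 45) = false := by simp; omega
      have d4 : decide (46 ≤ n ∧ n ≤ 60) = true := by simpa using h4
      have d5 : decide (61 ≤ n ∧ n ≤ 75) = false := by simp; omega
      rw [ih]
      simp only [List.filter_cons, d1, d2, d3, d4, d5, if_true, if_false, Bool.false_eq_true,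
        List.append_assoc, List.singleton_append]
    · have d1 : decide (1 ≤ n ∧ n ≤ 15) = false := by simp; omega
      have d2 : decide (16 ≤ n ∧ n ≤ 30) = false := by simp; omega
      have d3 : decide (31 ≤ n ∧ n ≤ 45) = false := by simp; omega
      have d4 : decide (46 ≤ n ∧ n ≤ 60) = false := by simp; omega
      have d5 : decide (61 ≤ n ∧ n ≤ 75) = true := by simpa using h5
      rw [ih]
      simp only [List.filter_cons, d1, d2, d3, d4, d5, if_true, if_false, Bool.false_eq_true,
        List.append_assoc, List.singleton_append]
    · have d1 : decide (1 ≤ n ∧ n ≤ 15) = false := by simp; omega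
      have d2 : decide (16 ≤ n ∧ n ≤ 30) = false := by simp; omega
      have d3 : decide (31 ≤ n ∧ n ≤ 45) = false := by simp; omega
      have d4 : decide (46 ≤ n ∧ n ≤ 60) = false := by simp; omega
      have d5 : decide (61 ≤ n ∧ n ≤ 75) = false := by simp; omega
      rw [ih]
      simp only [List.filter_cons, d1, d2, d3, d4, d5, if_true, if_false, Bool.false_eq_true,
        List.append_assoc, List.singleton_append]

-- the counter function counts occurrences
theorem bingoCounts_eq_count (drawn : List Int) (v : Int) (hv : 1 ≤ v ∧ v ≤ 75) :
    bingoCounts drawn v = drawn.count v := by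
  unfold bingoCounts
  suffices h : ∀ (c : Int → Nat),
      (drawn.foldl (fun c n => if 1 ≤ n ∧ n ≤ 75 then (fun v => if v = n then c v + 1 else c v) else c) c) v
      = c v + drawn.count v by
    simpa using h (fun _ => 0)
  induction drawn with
  | nil => simp
  | cons n rest ih =>
    intro c
    simp only [List.foldl_cons]
    by_cases hn : n = v
    · subst hn
      rw [if_pos hv, ih]
      simp only [List.count_cons]
      simp
      omega
    · rw [ih]
      have hcv : (if 1 ≤ n ∧ n ≤ 75 then (fun w => if w = n then c w + 1 else c w) else c) v = c v := by
        split_ifs with h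
        · exact if_neg (by omega)
        · rfl
      rw [hcv, List.count_cons_of_ne (by omega : n ≠ v)]

theorem count_flat (c : Int → Nat) (L : List Int) (hN : L.Nodup) (a : Int) :
    (L.flatMap (fun v => List.replicate (c v) v)).count a = if a ∈ L then c a else 0 := by
  induction L with
  | nil => simp
  | cons v L ih =>
    simp only [List.flatMap_cons, List.count_append, List.count_replicate, List.mem_cons]
    have hvL : v ∉ L := (List.nodup_cons.mp hN).1
    rw [ih (List.nodup_cons.mp hN).2]
    by_cases hav : a = v
    · subst hav; simp [hvL]
    · simp [hav, Ne.symm hav]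

theorem pairwise_flat (c : Int → Nat) (L : List Int) (hL : L.Pairwise (· < ·)) :
    (L.flatMap (fun v => List.replicate (c v) v)).Pairwise (· ≤ ·) := by
  induction L with
  | nil => simp
  | cons v L ih =>
    simp only [List.flatMap_cons]
    rw [List.pairwise_append]
    refine ⟨List.pairwise_replicate.mpr (by simp), ih (List.pairwise_cons.mp hL).2, ?_⟩
    intro x hx y hy
    rcases List.mem_flatMap.mp hy with ⟨u, hu, hyu⟩
    rw [List.eq_of_mem_replicate hx, List.eq_of_mem_replicate hyu]
    exact le_of_lt ((List.pairwise_cons.mp hL).1 u hu)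

-- each bucket of B is A's sorted filtered bucket
theorem bucket_eq_sorted (drawn : List Int) (lo hi : Int) (h1 : 1 ≤ lo) (h5 : hi ≤ 75) :
    PySem.List.sorted (drawn.filter (fun n => decide (lo ≤ n ∧ n ≤ hi))) (fun x => x) false
    = bingoBucket (bingoCounts drawn) lo hi := by
  unfold bingoBucket
  rw [PySem.List.foldl_append_eq_flatMap, List.nil_append]
  apply PySem.List.sorted_id_eq_of_perm_of_pairwise
  · rw [List.perm_iff_count]
    intro a
    rw [count_flat _ _ ((PySem.List.nodup_pyRange_one lo (hi + 1))) a]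
    by_cases hmem : lo ≤ a ∧ a ≤ hi
    · have hin : a ∈ PySem.List.pyRange lo (hi + 1) 1 :=
        PySem.List.mem_pyRange_one.mpr ⟨hmem.1, by omega⟩
      rw [if_pos hin, List.count_filter (by simpa using hmem)]
      exact bingoCounts_eq_count drawn a ⟨by omega, by omega⟩
    · have hout : a ∉ PySem.List.pyRange lo (hi + 1) 1 := by
        intro hc
        rcases PySem.List.mem_pyRange_one.mp hc with ⟨hl, hr⟩
        exact hmem ⟨hl, by omega⟩
      have hnf : a ∉ drawn.filter (fun n => decide (lo ≤ n ∧ n ≤ hi)) := by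
        intro hc
        exact hmem (by simpa using (List.mem_filter.mp hc).2)
      rw [if_neg hout, List.count_eq_zero.mpr hnf]
  · exact pairwise_flat _ _ (PySem.List.pairwise_lt_pyRange_one lo (hi + 1))

-- ===== VERDICT (by name: the statement is the Claim_ definition above) =====
theorem group_bingo_numbers_spec : Claim_equal_group_bingo_numbers := by
  intro drawn _
  unfold Spec_group_bingo_numbers group_bingo_numbers group_bingo_numbers_alt
  rw [bingo_fold_eq_filters]
  simp only [List.nil_append]
  rw [← bucket_eq_sorted drawn 1 15 (by norm_num) (by norm_num),
      ← bucket_eq_sorted drawn 16 30 (by norm_num) (by norm_num),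
      ← bucket_eq_sorted drawn 31 45 (by norm_num) (by norm_num),
      ← bucket_eq_sorted drawn 46 60 (by norm_num) (by norm_num),
      ← bucket_eq_sorted drawn 61 75 (by norm_num) (by norm_num)]
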